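-- pv_equiv track=rewrite | github.com/Lucas-Summers/mlreport | src/mlreport/comparison.py | _build_model_keys
-- ===== SOURCE A (Python) =====
-- from collections import Counter
--
-- def _build_model_keys(payloads: list[dict]) -> list[str]:
--     """
--     Create unique model keys for display and metric lookups.
--
--     Args:
--         payloads: Built report payloads.
--
--     Returns:
--         Unique model keys, preserving model names when possible.
--     """
--     model_names = [payload["model"]["name"] for payload in payloads]
--     name_counts = Counter(model_names)
--     seen_counts: dict[str, int] = {}
--     model_keys = []
--
--     for model_name in model_names:
--         if name_counts[model_name] == 1:
--             model_keys.append(model_name)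
--             continue
--
--         occurrence = seen_counts.get(model_name, 0) + 1
--         seen_counts[model_name] = occurrence
--         model_keys.append(f"{model_name} ({occurrence})")
--
--     return model_keys
-- ===== SOURCE B (Python) =====
-- def _build_model_keys(payloads: list[dict]) -> list[str]:
--     """Group positions by model name once, then scatter keys by index."""
--     names = [payload["model"]["name"] for payload in payloads]
--     positions: dict[str, list[int]] = {}
--     for i, name in enumerate(names):
--         positions.setdefault(name, []).append(i)
--     out = [None] * len(names)
--     for name, idxs in positions.items():
--         if len(idxs) == 1:
--             out[idxs[0]] = name
--         else:
--             for k, i in enumerate(idxs, start=1):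
--                 out[i] = f"{name} ({k})"
--     return out
-- ===== Notes on version B (the rewrite author's own statement) =====
-- stated objective: alternative
-- what changed: B replaces A's single streamed pass with a running per-name occurrence counter by a group-then-scatter scheme: it builds one dict mapping each name to the list of indices where it occurs, allocates the output list, and for each grouped name writes either the bare name or 'name (k)' (k = 1,2,...) directly at those positions.
import Mathlib
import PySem

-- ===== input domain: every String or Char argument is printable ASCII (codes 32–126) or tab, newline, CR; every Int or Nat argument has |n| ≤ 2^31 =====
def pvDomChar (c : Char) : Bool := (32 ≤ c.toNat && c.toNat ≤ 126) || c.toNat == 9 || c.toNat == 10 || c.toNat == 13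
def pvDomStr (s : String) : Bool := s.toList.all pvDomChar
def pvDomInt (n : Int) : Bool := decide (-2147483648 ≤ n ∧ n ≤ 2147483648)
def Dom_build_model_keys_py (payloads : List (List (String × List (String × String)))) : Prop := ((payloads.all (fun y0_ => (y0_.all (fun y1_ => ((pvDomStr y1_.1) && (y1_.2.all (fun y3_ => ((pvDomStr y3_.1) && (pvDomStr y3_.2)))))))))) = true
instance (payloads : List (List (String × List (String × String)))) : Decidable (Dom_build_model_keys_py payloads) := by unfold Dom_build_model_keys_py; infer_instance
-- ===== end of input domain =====

-- B groups the positions of each model name once and scatters the keys by index,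
-- instead of A's streamed per-name occurrence counter; objective: alternative decomposition (same cost).

-- shared helpers: payload["model"]["name"] (Pre_ guarantees both lookups succeed; the
-- getD "" default is never reached inside Pre_), and the f-string f"{name} ({c})"
def pvName (p : List (String × List (String × String))) : String :=
  ((((PySem.Dict.mk p).get? "model").bind (fun m => (PySem.Dict.mk m).get? "name"))).getD ""

def mkKey (n : String) (c : Int) : String := n ++ " (" ++ PySem.Int.toStr c ++ ")"

-- ===== PORT A =====
def stepA (counts : PySem.Dict String Int) (st : PySem.Dict String Int × List String) (n : String) :
    PySem.Dict String Int × List String :=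
  if counts.getD n 0 == 1 then (st.1, st.2 ++ [n])
  else
    let occurrence := st.1.getD n 0 + 1
    (st.1.insert n occurrence, st.2 ++ [mkKey n occurrence])

def build_model_keys_py (payloads : List (List (String × List (String × String)))) : List String :=
  let model_names := payloads.map pvName
  let name_counts := PySem.Dict.counter model_names
  (model_names.foldl (stepA name_counts) (PySem.Dict.empty, [])).2

-- ===== PORT B =====
-- one grouped item: a name with all its positions; single position → bare name,
-- several → scatter "name (k)" with k counting from 1 (enumerate(idxs, start=1))
def writeB (out : List String) (q : String × List Int) : List String :=
  if q.2.length == 1 then PySem.List.pySetD out (PySem.List.pyGetD q.2 0 0) q.1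
  else (PySem.List.enumerate q.2 1).foldl
        (fun out r => PySem.List.pySetD out r.2 (mkKey q.1 r.1)) out

-- [None] * len(names) is ported as replicate "" : every slot is overwritten (proved below)
def build_model_keys_py_alt (payloads : List (List (String × List (String × String)))) : List String :=
  let names := payloads.map pvName
  let positions := (PySem.List.enumerate names 0).foldl
      (fun d q => d.modify q.2 [] (fun l => l ++ [q.1])) PySem.Dict.empty
  positions.items.foldl writeB (List.replicate names.length "")

-- ===== PRECONDITION & SPEC =====
-- Pre_ excludes exactly the inputs where Python A raises KeyError: some payload lacks
-- the key "model" or its "model" dict lacks the key "name".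
def Pre_build_model_keys_py (payloads : List (List (String × List (String × String)))) : Prop :=
  payloads.all (fun p => (((PySem.Dict.mk p).get? "model").bind
    (fun m => (PySem.Dict.mk m).get? "name")).isSome) = true
instance (payloads : List (List (String × List (String × String)))) : Decidable (Pre_build_model_keys_py payloads) := by unfold Pre_build_model_keys_py; infer_instance

def pvWitness_build_model_keys_py : (List (List (String × List (String × String)))) :=
  [[("model", [("name", "m")])], [("model", [("name", "m")])]]

def Spec_build_model_keys_py (payloads : List (List (String × List (String × String)))) (out : List String) : Prop := out = build_model_keys_py_alt payloads
instance (payloads : List (List (String × List (String × String)))) (out : List String) : Decidable (Spec_build_model_keys_py payloads out) := by unfold Spec_build_model_keys_py; infer_instance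

-- ===== CLAIM (what is proved, stated in full; the proofs are below) =====
def Claim_equal_build_model_keys_py : Prop := ∀ (payloads : List (List (String × List (String × String)))), Dom_build_model_keys_py payloads → Pre_build_model_keys_py payloads → Spec_build_model_keys_py payloads (build_model_keys_py payloads)

-- ===== LEMMAS AND PROOFS =====

-- the common value both programs produce at position j
def keyAt (names : List String) (j : Nat) : String :=
  let n := names.getD j ""
  if names.count n = 1 then n else mkKey n (((names.take j).count n : Int) + 1)

-- ---- A side ----

-- value produced by A's loop for position j of the remaining suffix `rest`,
-- given the running occurrence dict `seen`
def genA (names : List String) (seen : PySem.Dict String Int) (rest : List String) (j : Nat) : String :=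
  let m := rest.getD j ""
  if names.count m = 1 then m
  else mkKey m (seen.getD m 0 + ((rest.take j).count m : Int) + 1)

lemma loopA_eq (names : List String) :
    ∀ (rest : List String) (seen : PySem.Dict String Int) (acc : List String),
    (rest.foldl (stepA (PySem.Dict.counter names)) (seen, acc)).2
      = acc ++ (List.range rest.length).map (genA names seen rest) := by
  intro rest
  induction rest with
  | nil => intro seen acc; simp
  | cons n t ih =>
    intro seen acc
    rw [List.foldl_cons]
    by_cases h : names.count n = 1
    · have hstep : stepA (PySem.Dict.counter names) (seen, acc) n = (seen, acc ++ [n]) := by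
        simp [stepA, PySem.Dict.getD_counter, h]
      rw [hstep, ih]
      rw [List.length_cons, List.range_succ_eq_map, List.map_cons, List.map_map]
      have h0 : genA names seen (n :: t) 0 = n := by
        simp [genA, h]

      rw [h0, List.append_assoc]
      congr 1
      simp only [List.singleton_append]
      congr 1
      apply List.map_congr_left
      intro j _
      simp only [Function.comp_apply, genA, Nat.succ_eq_add_one]
      have hget : (n :: t).getD (j + 1) "" = t.getD j "" := rfl
      rw [hget]
      by_cases hc : names.count (t.getD j "") = 1
      · rw [if_pos hc, if_pos hc]
      · rw [if_neg hc, if_neg hc]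
        have hne : (n == t.getD j "") = false := by
          simp only [beq_eq_false_iff_ne]
          intro he; exact hc (he ▸ h)
        rw [List.take_succ_cons, List.count_cons, hne]
        simp
    · have hstep : stepA (PySem.Dict.counter names) (seen, acc) n
          = (seen.insert n (seen.getD n 0 + 1), acc ++ [mkKey n (seen.getD n 0 + 1)]) := by
        simp only [stepA, PySem.Dict.getD_counter]
        rw [if_neg]
        simp only [beq_iff_eq]
        exact_mod_cast h
      rw [hstep, ih]
      rw [List.length_cons, List.range_succ_eq_map, List.map_cons, List.map_map]
      have h0 : genA names seen (n :: t) 0 = mkKey n (seen.getD n 0 + 1) := by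
        simp [genA, h]
      rw [h0, List.append_assoc]
      congr 1
      simp only [List.singleton_append]
      congr 1
      apply List.map_congr_left
      intro j _
      simp only [Function.comp_apply, genA, Nat.succ_eq_add_one]
      have hget : (n :: t).getD (j + 1) "" = t.getD j "" := rfl
      rw [hget]
      by_cases hc : names.count (t.getD j "") = 1
      · rw [if_pos hc, if_pos hc]
      · rw [if_neg hc, if_neg hc]
        rw [List.take_succ_cons, List.count_cons]
        rw [PySem.Dict.getD_insert]
        by_cases he : t.getD j "" = n
        · rw [if_pos he, if_pos (by simp only [beq_iff_eq]; exact he.symm)]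
          simp only [he]
          congr 1
          push_cast
          ring
        · rw [if_neg he, if_neg (by simp only [beq_iff_eq]; exact fun hx => he hx.symm)]
          simp

lemma A_eq_map (payloads : List (List (String × List (String × String)))) :
    build_model_keys_py payloads
      = (List.range (payloads.map pvName).length).map (keyAt (payloads.map pvName)) := by
  unfold build_model_keys_py
  rw [loopA_eq]
  rw [List.nil_append]
  apply List.map_congr_left
  intro j _
  simp only [genA, keyAt, PySem.Dict.getD_empty, zero_add]

-- ---- B side ----

-- positions of n among (enumerate names s)
def idxsOf (names : List String) (s : Int) (n : String) : List Int :=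
  ((PySem.List.enumerate names s).filter (fun q => q.2 == n)).map (fun q => q.1)

lemma idxsOf_cons (names : List String) (s : Int) (n m : String) :
    idxsOf (m :: names) s n
      = (if m == n then [s] else []) ++ idxsOf names (s + 1) n := by
  by_cases h : (m == n) = true
  · simp [idxsOf, PySem.List.enumerate_cons, h]
  · simp [idxsOf, PySem.List.enumerate_cons, h]

lemma length_idxsOf (names : List String) (s : Int) (n : String) :
    (idxsOf names s n).length = names.count n := by
  induction names generalizing s with
  | nil => simp [idxsOf, PySem.List.enumerate_nil]
  | cons m t ih =>
    rw [idxsOf_cons, List.length_append, List.count_cons, ih]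
    by_cases h : (m == n) = true
    · simp [h, Nat.add_comm]
    · simp [h]

lemma mem_idxsOf (names : List String) (s : Int) (n : String) (x : Int) :
    x ∈ idxsOf names s n → ∃ (k : Nat) (h : k < names.length), x = s + k ∧ names[k] = n := by
  intro hx
  simp only [idxsOf, List.mem_map, List.mem_filter] at hx
  obtain ⟨q, ⟨hqE, hqn⟩, rfl⟩ := hx
  rw [PySem.List.mem_enumerate_iff] at hqE
  obtain ⟨k, hk, rfl⟩ := hqE
  exact ⟨k, hk, rfl, by simpa using hqn⟩

lemma getElem?_idxsOf (names : List String) :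
    ∀ (s : Int) (j : Nat), ∀ (hj : j < names.length),
    (idxsOf names s (names[j]))[(names.take j).count names[j]]? = some (s + j) := by
  induction names with
  | nil => intro s j hj; simp at hj
  | cons m t ih =>
    intro s j hj
    cases j with
    | zero =>
      simp only [List.getElem_cons_zero, List.take_zero, List.count_nil]
      rw [idxsOf_cons]
      simp
    | succ j =>
      have hj' : j < t.length := by simpa using hj
      simp only [List.getElem_cons_succ, List.take_succ_cons, List.count_cons]
      rw [idxsOf_cons]
      by_cases h : (m == t[j]) = true
      · rw [if_pos h]
        have hidx : (List.count t[j] (List.take j t) + if (m == t[j]) = true then 1 else 0)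
            = List.count t[j] (List.take j t) + 1 := by simp [h]
        rw [hidx]
        simp only [List.singleton_append, List.getElem?_cons_succ]
        rw [ih (s + 1) j hj']
        congr 1
        push_cast
        ring
      · rw [if_neg h]
        have hidx : (List.count t[j] (List.take j t) + if (m == t[j]) = true then 1 else 0)
            = List.count t[j] (List.take j t) := by simp [h]
        rw [hidx]
        simp only [List.nil_append]
        rw [ih (s + 1) j hj']
        congr 1
        push_cast
        ring

lemma positions_getD (names : List String) (n : String) :
    (((PySem.List.enumerate names 0).foldl
        (fun d q => d.modify q.2 [] (fun l => l ++ [q.1])) PySem.Dict.empty).getD n [])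
      = idxsOf names 0 n := by
  have hfold : (PySem.List.enumerate names 0).foldl
      (fun d q => d.modify q.2 [] (fun l => l ++ [q.1])) PySem.Dict.empty
    = ((PySem.List.enumerate names 0).map (fun q => (q.2, q.1))).foldl
      (fun d p => d.modify p.1 [] (fun l => l ++ [p.2])) PySem.Dict.empty := by
    rw [List.foldl_map]
  rw [hfold, PySem.Dict.getD_foldl_modify_append, PySem.Dict.getD_empty, List.nil_append]
  simp [idxsOf, List.filter_map, List.map_map, Function.comp_def]

lemma positions_items (names : List String) :
    ((PySem.List.enumerate names 0).foldl
        (fun d q => d.modify q.2 [] (fun l => l ++ [q.1])) PySem.Dict.empty).items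
      = (PySem.Set.ofList names).map (fun n => (n, idxsOf names 0 n)) := by
  have hkeys : ((PySem.List.enumerate names 0).foldl
      (fun d q => d.modify q.2 [] (fun l => l ++ [q.1])) PySem.Dict.empty).keys
      = PySem.Set.ofList names := by
    rw [PySem.Dict.keys_foldl_modify_key (PySem.List.enumerate names 0)
      (fun q => q.2) [] (fun _ q => fun l => l ++ [q.1]) PySem.Dict.empty]
    rw [PySem.Dict.keys_empty, PySem.Set.update_nil_left, PySem.List.map_snd_enumerate]
  have hnd : ((PySem.List.enumerate names 0).foldl
      (fun d q => d.modify q.2 [] (fun l => l ++ [q.1])) PySem.Dict.empty).keys.Nodup := by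
    rw [hkeys]; exact PySem.Set.nodup_ofList names
  rw [PySem.Dict.items_eq_map_keys _ hnd [], hkeys]
  apply List.map_congr_left
  intro n _
  rw [positions_getD]

lemma setFold_miss (n : String) :
    ∀ (idxs : List Int) (s : Int) (out : List String) (j : Nat),
    (∀ x ∈ idxs, 0 ≤ x) → (j : Int) ∉ idxs →
    ((PySem.List.enumerate idxs s).foldl
        (fun out r => PySem.List.pySetD out r.2 (mkKey n r.1)) out)[j]? = out[j]? := by
  intro idxs
  induction idxs with
  | nil => intro s out j _ _; simp [PySem.List.enumerate_nil]
  | cons i t ih =>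
    intro s out j hpos hj
    rw [PySem.List.enumerate_cons, List.foldl_cons]
    rw [ih (s + 1) _ j (fun x hx => hpos x (List.mem_cons_of_mem _ hx))
        (fun hx => hj (List.mem_cons_of_mem _ hx))]
    rw [PySem.List.pySetD_of_nonneg _ _ (hpos i List.mem_cons_self)]
    apply List.getElem?_set_ne
    intro he
    apply hj
    have : (j : Int) = i := by
      rw [← he]
      exact Int.toNat_of_nonneg (hpos i List.mem_cons_self)
    rw [this]
    exact List.mem_cons_self

lemma setFold_length (n : String) :
    ∀ (idxs : List Int) (s : Int) (out : List String),
    ((PySem.List.enumerate idxs s).foldl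
        (fun out r => PySem.List.pySetD out r.2 (mkKey n r.1)) out).length = out.length := by
  intro idxs
  induction idxs with
  | nil => intro s out; simp [PySem.List.enumerate_nil]
  | cons i t ih =>
    intro s out
    rw [PySem.List.enumerate_cons, List.foldl_cons, ih (s + 1), PySem.List.length_pySetD]

lemma setFold_hit (n : String) :
    ∀ (idxs : List Int) (s : Int) (out : List String) (j c : Nat),
    (∀ x ∈ idxs, 0 ≤ x) → idxs.Nodup → idxs[c]? = some (j : Int) → j < out.length →
    ((PySem.List.enumerate idxs s).foldl
        (fun out r => PySem.List.pySetD out r.2 (mkKey n r.1)) out)[j]? = some (mkKey n (s + c)) := by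
  intro idxs
  induction idxs with
  | nil => intro s out j c _ _ hc _; simp at hc
  | cons i t ih =>
    intro s out j c hpos hnd hc hjlen
    rw [PySem.List.enumerate_cons, List.foldl_cons]
    cases c with
    | zero =>
      have hi : i = (j : Int) := by simpa using hc
      rw [setFold_miss n t (s + 1) _ j (fun x hx => hpos x (List.mem_cons_of_mem _ hx))
          (by rw [← hi]; exact (List.nodup_cons.mp hnd).1)]
      rw [PySem.List.pySetD_of_nonneg _ _ (hpos i List.mem_cons_self)]
      have : i.toNat = j := by rw [hi]; exact Int.toNat_natCast j
      rw [this]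
      rw [List.getElem?_set_self hjlen]
      simp
    | succ c =>
      have hc' : t[c]? = some (j : Int) := by simpa using hc
      rw [ih (s + 1) _ j c (fun x hx => hpos x (List.mem_cons_of_mem _ hx))
          (List.nodup_cons.mp hnd).2 hc'
          (by rw [PySem.List.length_pySetD]; exact hjlen)]
      congr 2
      push_cast
      ring

lemma writeB_length (out : List String) (q : String × List Int) :
    (writeB out q).length = out.length := by
  unfold writeB
  split
  · rw [PySem.List.length_pySetD]
  · rw [setFold_length]

lemma nodup_idxsOf (names : List String) (s : Int) (n : String) :
    (idxsOf names s n).Nodup := by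
  have h1 := (PySem.List.pairwise_lt_enumerate names s).filter (fun q => q.2 == n)
  unfold idxsOf
  rw [List.Nodup, List.pairwise_map]
  exact h1.imp (fun h => ne_of_lt h)

lemma writeB_miss (names : List String) (out : List String) (n : String) (j : Nat)
    (hj : j < names.length) (hne : names[j] ≠ n) :
    (writeB out (n, idxsOf names 0 n))[j]? = out[j]? := by
  have hpos : ∀ x ∈ idxsOf names 0 n, 0 ≤ x := by
    intro x hx
    obtain ⟨k, _, rfl, _⟩ := mem_idxsOf names 0 n x hx
    simp
  have hjmem : (j : Int) ∉ idxsOf names 0 n := by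
    intro hx
    obtain ⟨k, hk, hkj, hkn⟩ := mem_idxsOf names 0 n _ hx
    have hjk : j = k := by
      have : (j : Int) = k := by rw [hkj]; ring
      exact_mod_cast this
    have h1 : names[j]? = names[k]? := by rw [hjk]
    rw [List.getElem?_eq_getElem hj, List.getElem?_eq_getElem hk] at h1
    exact hne (Option.some_injective _ h1 |>.trans hkn)
  unfold writeB
  split
  · next hlen1 =>
    obtain ⟨a, ha⟩ := List.length_eq_one_iff.mp (by simpa using hlen1)
    rw [ha]
    have hga : PySem.List.pyGetD [a] 0 0 = a := by
      simp [PySem.List.pyGetD]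
    rw [hga, PySem.List.pySetD_of_nonneg _ _ (hpos a (by rw [ha]; exact List.mem_cons_self))]
    apply List.getElem?_set_ne
    intro he
    apply hjmem
    have : (j : Int) = a := by
      rw [← he]
      exact Int.toNat_of_nonneg (hpos a (by rw [ha]; exact List.mem_cons_self))
    rw [this, ha]
    exact List.mem_cons_self
  · exact setFold_miss n _ 1 out j hpos hjmem

lemma writeB_hit (names : List String) (out : List String) (j : Nat)
    (hj : j < names.length) (hlen : out.length = names.length) :
    (writeB out (names[j], idxsOf names 0 names[j]))[j]? = some (keyAt names j) := by
  have hpos : ∀ x ∈ idxsOf names 0 names[j], 0 ≤ x := by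
    intro x hx
    obtain ⟨k, _, rfl, _⟩ := mem_idxsOf names 0 names[j] x hx
    simp
  have hget : (idxsOf names 0 names[j])[(names.take j).count names[j]]? = some (j : Int) := by
    have := getElem?_idxsOf names 0 j hj
    simpa using this
  have hkeyAt : keyAt names j
      = if names.count names[j] = 1 then names[j]
        else mkKey names[j] (((names.take j).count names[j] : Int) + 1) := by
    unfold keyAt
    rw [List.getD_eq_getElem names "" hj]
  unfold writeB
  split
  · next hlen1 =>
    have hcnt : names.count names[j] = 1 := by
      rw [← length_idxsOf names 0 names[j]]
      simpa using hlen1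
    obtain ⟨a, ha⟩ := List.length_eq_one_iff.mp (by simpa using hlen1)
    rw [ha] at hget
    have hpos0 : (names.take j).count names[j] = 0 := by
      by_contra hne0
      cases hc : (names.take j).count names[j] with
      | zero => exact hne0 hc
      | succ c => rw [hc] at hget; simp at hget
    rw [hpos0] at hget
    have haj : a = (j : Int) := by simpa using hget
    have hga : PySem.List.pyGetD [a] 0 0 = a := by
      simp [PySem.List.pyGetD]
    rw [ha, hga, haj, PySem.List.pySetD_of_nonneg _ _ (by positivity)]
    rw [Int.toNat_natCast]
    rw [List.getElem?_set_self (by rw [hlen]; exact hj)]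
    rw [hkeyAt, if_pos hcnt]
  · next hlen1 =>
    have hcnt : ¬ names.count names[j] = 1 := by
      rw [← length_idxsOf names 0 names[j]]
      simpa using hlen1
    rw [setFold_hit names[j] _ 1 out j _ hpos (nodup_idxsOf names 0 names[j]) hget
        (by rw [hlen]; exact hj)]
    rw [hkeyAt, if_neg hcnt]
    congr 2
    ring

lemma itemsFold (names : List String) (j : Nat) (hj : j < names.length) :
    ∀ (ks : List String) (out : List String), out.length = names.length →
    ((ks.map (fun n => (n, idxsOf names 0 n))).foldl writeB out)[j]?
      = if names[j] ∈ ks then some (keyAt names j) else out[j]? := by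
  intro ks
  induction ks with
  | nil => intro out _; simp
  | cons k ks ih =>
    intro out hlen
    rw [List.map_cons, List.foldl_cons]
    have hlen' : (writeB out (k, idxsOf names 0 k)).length = names.length := by
      rw [writeB_length]; exact hlen
    rw [ih _ hlen']
    by_cases hmem : names[j] ∈ ks
    · rw [if_pos hmem, if_pos (List.mem_cons_of_mem _ hmem)]
    · rw [if_neg hmem]
      by_cases hk : names[j] = k
      · rw [if_pos (by rw [hk]; exact List.mem_cons_self)]
        rw [← hk, writeB_hit names out j hj hlen]
      · rw [if_neg (by simp [hk, hmem]), writeB_miss names out k j hj hk]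

lemma B_getElem? (payloads : List (List (String × List (String × String)))) (j : Nat)
    (hj : j < (payloads.map pvName).length) :
    (build_model_keys_py_alt payloads)[j]? = some (keyAt (payloads.map pvName) j) := by
  unfold build_model_keys_py_alt
  show (List.foldl writeB (List.replicate (payloads.map pvName).length "")
      ((List.foldl (fun d q => d.modify q.2 [] fun l => l ++ [q.1]) PySem.Dict.empty
        (PySem.List.enumerate (payloads.map pvName) 0)).items))[j]?
    = some (keyAt (payloads.map pvName) j)
  rw [positions_items]
  rw [itemsFold (payloads.map pvName) j hj _ _ (List.length_replicate)]
  rw [if_pos (by exact (PySem.Set.mem_ofList _ _).mpr (List.getElem_mem hj))]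

lemma foldl_writeB_length :
    ∀ (l : List (String × List Int)) (out : List String),
    (l.foldl writeB out).length = out.length := by
  intro l
  induction l with
  | nil => intro out; rfl
  | cons q l ih =>
    intro out
    rw [List.foldl_cons, ih, writeB_length]

lemma B_length (payloads : List (List (String × List (String × String)))) :
    (build_model_keys_py_alt payloads).length = (payloads.map pvName).length := by
  unfold build_model_keys_py_alt
  show (List.foldl writeB (List.replicate (payloads.map pvName).length "")
      ((List.foldl (fun d q => d.modify q.2 [] fun l => l ++ [q.1]) PySem.Dict.empty
        (PySem.List.enumerate (payloads.map pvName) 0)).items)).length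
    = (payloads.map pvName).length
  rw [foldl_writeB_length, List.length_replicate]

-- ===== VERDICT (by name: the statement is the Claim_ definition above) =====
theorem build_model_keys_py_spec : Claim_equal_build_model_keys_py := by
  intro payloads _ _
  unfold Spec_build_model_keys_py
  apply List.ext_getElem?
  intro i
  rw [A_eq_map]
  by_cases hi : i < (payloads.map pvName).length
  · rw [B_getElem? payloads i hi]
    rw [List.getElem?_map, List.getElem?_range hi]
    rfl
  · rw [List.getElem?_eq_none (by simpa using hi)]
    rw [List.getElem?_eq_none (by rw [B_length]; exact Nat.le_of_not_lt hi)]
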